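-- pv_equiv track=rewrite | github.com/Cartmanishere/advent-of-code-2020 | py-advoc/day_8.py | execute
-- ===== SOURCE A (Python) =====
-- def execute(idx, prog, acc, e_ops, return_acc=False):
--     if idx in e_ops:
--         if return_acc:
--             return acc
--         return
--
--     if idx >= len(prog):
--         return acc
--
--     op_name, op_val_str = prog[idx].split()
--
--     if op_name == 'acc':
--         acc += int(op_val_str)
--
--     next_idx = idx + 1
--     if op_name == 'jmp':
--         next_idx = idx + int(op_val_str)
--
--     e_ops.add(idx)
--     return execute(next_idx, prog, acc, e_ops, return_acc=return_acc)
-- ===== SOURCE B (Python) =====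
-- def _decode(op, v):
--     # instruction -> (delta_acc, delta_idx)
--     if op == 'acc':
--         return v, 1
--     if op == 'jmp':
--         return 0, v
--     return 0, 1
--
-- def execute(idx, prog, acc, e_ops, return_acc=False):
--     n = len(prog)
--     while idx not in e_ops and idx < n:
--         op, val = prog[idx].split()
--         d_acc, d_idx = _decode(op, int(val))
--         e_ops.add(idx)
--         acc += d_acc
--         idx += d_idx
--     if idx in e_ops:
--         return acc if return_acc else None
--     return acc
-- ===== Notes on version B (the rewrite author's own statement) =====
-- stated objective: idiomatic
-- what changed: A's self-recursion (one call frame per executed instruction, per-opcode in-branch updates) becomes an explicit while loop whose body decodes each instruction once into an (delta_acc, delta_idx) pair via a helper table and applies the deltas uniformly; the return dispatch moves after the loop.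
-- outside the precondition, e.g. on execute(0, ['foo bar'], 5, set(), False): A returns 5, B raises ValueError; on execute(1, ['x', 'acc +2'], 0, set(), True): A returns 2, B returns 2; on execute(0, ['jmp -1', 'acc +1'], 0, set(), True): A returns 1, B returns 1
import Mathlib
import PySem

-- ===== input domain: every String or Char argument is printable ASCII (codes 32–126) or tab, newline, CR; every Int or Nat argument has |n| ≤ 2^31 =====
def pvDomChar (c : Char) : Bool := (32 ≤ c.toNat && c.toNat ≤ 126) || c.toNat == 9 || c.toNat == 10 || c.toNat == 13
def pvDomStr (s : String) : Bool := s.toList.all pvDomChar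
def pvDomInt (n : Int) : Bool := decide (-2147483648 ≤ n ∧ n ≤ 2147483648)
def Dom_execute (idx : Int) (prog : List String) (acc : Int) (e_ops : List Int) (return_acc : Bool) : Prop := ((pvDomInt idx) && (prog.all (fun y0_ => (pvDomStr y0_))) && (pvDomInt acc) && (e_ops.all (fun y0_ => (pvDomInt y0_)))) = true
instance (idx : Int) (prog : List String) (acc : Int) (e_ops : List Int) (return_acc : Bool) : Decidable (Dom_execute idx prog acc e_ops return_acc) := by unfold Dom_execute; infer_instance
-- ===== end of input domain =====

-- B replaces A's tail recursion with per-opcode in-branch updates by a while loop whose body decodes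
-- each instruction once into a (delta_acc, delta_idx) pair and applies the deltas uniformly; return-value
-- equivalence is proved on Pre_ (both versions also mutate the passed-in set e_ops identically there).

-- ===== PORT A =====
-- literal port of A's self-recursion; fuel only makes the recursion structural (every executed index is
-- distinct and lies in [-len, len), so 2*len+2 calls always suffice); where the Python raises
-- (IndexError when an index below -len is reached, ValueError on a malformed executed line) the port
-- returns none and Pre_execute excludes the input.
def executeRec : Nat → Int → List String → Int → PySem.Set Int → Bool → Option Int
  | 0, _, _, _, _, _ => none
  | fuel+1, idx, prog, acc, e_ops, return_acc =>
    if e_ops.contains idx then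
      (if return_acc then some acc else none)
    else if (prog.length : Int) ≤ idx then
      some acc
    else
      match PySem.List.pyGet? prog idx with
      | none => none
      | some line =>
        match PySem.Str.split₀ line with
        | [op_name, op_val_str] =>
          if op_name = "acc" then
            match PySem.Int.ofStr? op_val_str with
            | none => none
            | some v => executeRec fuel (idx + 1) prog (acc + v) (PySem.Set.add e_ops idx) return_acc
          else if op_name = "jmp" then
            match PySem.Int.ofStr? op_val_str with
            | none => none
            | some v => executeRec fuel (idx + v) prog acc (PySem.Set.add e_ops idx) return_acc
          else
            executeRec fuel (idx + 1) prog acc (PySem.Set.add e_ops idx) return_acc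
        | _ => none

def execute (idx : Int) (prog : List String) (acc : Int) (e_ops : List Int) (return_acc : Bool) : Option Int :=
  executeRec (2 * prog.length + 2) idx prog acc e_ops return_acc

-- ===== PORT B =====
-- port of Source B: _decode maps an instruction to its (delta_acc, delta_idx) pair; the while loop threads
-- (idx, acc, seen) and always parses the operand; the dispatch on the exit state follows the loop.
def pvDecode (op : String) (v : Int) : Int × Int :=
  if op = "acc" then (v, 1)
  else if op = "jmp" then (0, v)
  else (0, 1)

def pvLoop : Nat → Int → Int → List String → PySem.Set Int → Option (Int × Int × PySem.Set Int)
  | 0, _, _, _, _ => none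
  | fuel+1, idx, acc, prog, seen =>
    if ¬ seen.contains idx ∧ idx < (prog.length : Int) then
      match PySem.List.pyGet? prog idx with
      | none => none
      | some line =>
        match PySem.Str.split₀ line with
        | [op, val] =>
          match PySem.Int.ofStr? val with
          | none => none
          | some v =>
            let d := pvDecode op v
            pvLoop fuel (idx + d.2) (acc + d.1) prog (PySem.Set.add seen idx)
        | _ => none
    else some (idx, acc, seen)

def execute_alt (idx : Int) (prog : List String) (acc : Int) (e_ops : List Int) (return_acc : Bool) : Option Int :=
  match pvLoop (2 * prog.length + 2) idx acc prog e_ops with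
  | none => none
  | some (i, a, seen) =>
    if seen.contains i then (if return_acc then some a else none) else some a

-- ===== PRECONDITION & SPEC =====
-- pvLineOK i s: line i is "op val" with an int operand and, when op is 'jmp', a nonnegative target i+v.
def pvLineOK (i : Nat) (s : String) : Bool :=
  match PySem.Str.split₀ s with
  | [a, b] =>
    match PySem.Int.ofStr? b with
    | some v => if a = "jmp" then decide (0 ≤ (i : Int) + v) else true
    | none => false
  | _ => false

-- Pre_ admits every input handled before any line is touched (idx already seen, or idx past the end) and
-- otherwise requires -len ≤ idx with every line of the form "op int" and every jmp target nonnegative: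
-- a conservative closed-form guarantee that no run raises (A: IndexError below -len / ValueError on an
-- executed malformed line; B in addition raises ValueError on any executed line whose operand is not an
-- int, e.g. "foo bar", where A still returns). The conservative per-line condition also excludes some
-- runs (a dead malformed line, a jmp to a negative in-range index) on which both programs return the
-- same value; see the cited examples.
def Pre_execute (idx : Int) (prog : List String) (acc : Int) (e_ops : List Int) (return_acc : Bool) : Prop :=
  idx ∈ e_ops ∨ (prog.length : Int) ≤ idx ∨
    (-(prog.length : Int) ≤ idx ∧ (prog.zipIdx.all fun p => pvLineOK p.2 p.1) = true)
instance (idx : Int) (prog : List String) (acc : Int) (e_ops : List Int) (return_acc : Bool) : Decidable (Pre_execute idx prog acc e_ops return_acc) := by unfold Pre_execute; infer_instance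

def pvWitness_execute : Int × List String × Int × List Int × Bool :=
  (0, ["nop +0", "acc +1", "jmp -2"], 0, [], true)

def Spec_execute (idx : Int) (prog : List String) (acc : Int) (e_ops : List Int) (return_acc : Bool) (out : Option Int) : Prop := out = execute_alt idx prog acc e_ops return_acc
instance (idx : Int) (prog : List String) (acc : Int) (e_ops : List Int) (return_acc : Bool) (out : Option Int) : Decidable (Spec_execute idx prog acc e_ops return_acc out) := by unfold Spec_execute; infer_instance

-- ===== CLAIM (what is proved, stated in full; the proofs are below) =====
def Claim_equal_execute : Prop := ∀ (idx : Int) (prog : List String) (acc : Int) (e_ops : List Int) (return_acc : Bool), Dom_execute idx prog acc e_ops return_acc → Pre_execute idx prog acc e_ops return_acc → Spec_execute idx prog acc e_ops return_acc (execute idx prog acc e_ops return_acc)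

-- ===== LEMMAS AND PROOFS =====

-- for -len ≤ idx < len with every line well-formed: the executed line and its wrapped index
theorem step_facts (prog : List String) (idx : Int)
    (hwf : (prog.zipIdx.all fun p => pvLineOK p.2 p.1) = true)
    (hlo : -(prog.length : Int) ≤ idx) (hhi : idx < (prog.length : Int)) :
    ∃ (j : Nat) (L : String), j < prog.length ∧
      (idx = (j : Int) ∨ idx = (j : Int) - prog.length) ∧
      PySem.List.pyGet? prog idx = some L ∧ pvLineOK j L = true := by
  have hall := List.all_eq_true.1 hwf
  have hok : ∀ (j : Nat) (hj : j < prog.length), pvLineOK j (prog[j]'hj) = true := by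
    intro j hj
    have := List.forall_mem_zipIdx'
      (p := fun q : String × Nat => pvLineOK q.2 q.1 = true) (l := prog)
    exact this.1 (fun x hx => hall x hx) j hj
  by_cases h0 : 0 ≤ idx
  · have hj : idx.toNat < prog.length := by omega
    exact ⟨idx.toNat, prog[idx.toNat]'hj, hj, Or.inl (by omega),
      PySem.List.pyGet?_eq_some_getElem prog h0 hhi, hok _ hj⟩
  · obtain ⟨k, hkeq⟩ : ∃ k : Nat, idx = -(k : Int) := ⟨(-idx).toNat, by omega⟩
    subst hkeq
    have hk1 : 0 < k := by omega
    have hk2 : k ≤ prog.length := by omega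
    have hj : prog.length - k < prog.length := by omega
    refine ⟨prog.length - k, prog[prog.length - k]'hj, hj, Or.inr (by omega), ?_, hok _ hj⟩
    rw [PySem.List.pyGet?_neg_natCast prog k hk1 hk2, List.getElem?_eq_getElem hj]

-- core invariant: with every line well-formed and idx ≥ -len, A's recursion equals B's loop + dispatch
theorem rec_eq_loop (prog : List String)
    (hwf : (prog.zipIdx.all fun p => pvLineOK p.2 p.1) = true) :
    ∀ (fuel : Nat) (idx acc : Int) (seen : PySem.Set Int) (ra : Bool),
      -(prog.length : Int) ≤ idx →
      executeRec fuel idx prog acc seen ra =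
        match pvLoop fuel idx acc prog seen with
        | none => none
        | some (i, a, s) => if s.contains i then (if ra then some a else none) else some a := by
  intro fuel
  induction fuel with
  | zero => intro idx acc seen ra _; simp [executeRec, pvLoop]
  | succ f ih =>
    intro idx acc seen ra hlo
    by_cases hc : idx ∈ seen
    · simp [executeRec, pvLoop, hc]
    · by_cases hl : idx < (prog.length : Int)
      · have hnl : ¬ ((prog.length : Int) ≤ idx) := by omega
        obtain ⟨j, L, hj, hrel, hget, hok⟩ := step_facts prog idx hwf hlo hl
        unfold pvLineOK at hok
        cases hs : PySem.Str.split₀ L with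
        | nil => rw [hs] at hok; simp at hok
        | cons a t =>
          cases t with
          | nil => rw [hs] at hok; simp at hok
          | cons b t2 =>
            cases t2 with
            | cons c t3 => rw [hs] at hok; simp at hok
            | nil =>
              rw [hs] at hok
              cases hv : PySem.Int.ofStr? b with
              | none => simp [hv] at hok
              | some v =>
                by_cases ha : a = "acc"
                · have ihs := ih (idx + 1) (acc + v) (PySem.Set.add seen idx) ra (by omega)
                  simp [PySem.Set.add, hc] at ihs
                  simp [executeRec, pvLoop, hc, hl, hnl, hget, hs, ha, hv, pvDecode, ihs]
                · by_cases hjm : a = "jmp"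
                  · have htgt : 0 ≤ (j : Int) + v := by
                      simpa [hv, hjm] using hok
                    have ihs := ih (idx + v) acc (PySem.Set.add seen idx) ra (by omega)
                    simp [PySem.Set.add, hc] at ihs
                    simp [executeRec, pvLoop, hc, hl, hnl, hget, hs, ha, hjm, hv, pvDecode, ihs]
                  · have ihs := ih (idx + 1) acc (PySem.Set.add seen idx) ra (by omega)
                    simp [PySem.Set.add, hc] at ihs
                    simp [executeRec, pvLoop, hc, hl, hnl, hget, hs, ha, hjm, hv, pvDecode, ihs]
      · have hnl : (prog.length : Int) ≤ idx := by omega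
        simp [executeRec, pvLoop, hc, hl, hnl]

-- ===== VERDICT (by name: the statement is the Claim_ definition above) =====
theorem execute_spec : Claim_equal_execute := by
  intro idx prog acc e_ops return_acc _ hpre
  unfold Spec_execute execute execute_alt
  rcases hpre with hc | hge | ⟨hlo, hwf⟩
  · have : (2 : Nat) * prog.length + 2 = (2 * prog.length + 1) + 1 := by omega
    rw [this]
    simp [executeRec, pvLoop, hc]
  · by_cases hc : idx ∈ e_ops
    · have : (2 : Nat) * prog.length + 2 = (2 * prog.length + 1) + 1 := by omega
      rw [this]; simp [executeRec, pvLoop, hc]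
    · have : (2 : Nat) * prog.length + 2 = (2 * prog.length + 1) + 1 := by omega
      rw [this]
      have hnl : ¬ idx < (prog.length : Int) := by omega
      simp [executeRec, pvLoop, hc, hge, hnl]
  · exact rec_eq_loop prog hwf _ idx acc e_ops return_acc hlo
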